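-- pv_equiv track=rewrite | github.com/nditech/apollo | psc/app.py | _edayc_validate
-- ===== SOURCE A (Python) =====
-- def _edayc_validate(responses):
--     range_error = []
--     attribute_error = []
--     for key in responses.keys():
--         if key not in ['AA', 'BA', 'BB', 'BC', 'BD', 'BE', 'BF', 'BG', 'BH', 'BJ', 'BK', 'BM', 'BN', 'BP', 'CA', 'CB', 'CC', 'CD', 'CE', 'CF', 'CG', 'CH', 'CJ', 'CK', 'CM', 'CN', 'CP', 'CQ', 'DA', 'DB', 'DC', 'DD', 'DE', 'DF', 'DG', 'DH', 'EA', 'EB', 'EC', 'ED', 'EE', 'EF', 'EG', 'EH', 'EJ', 'EK', 'EM', 'EN', 'EP', 'EQ', 'ER', 'ES', 'ET', 'EU', 'EV', 'EW', 'EX', 'EY', 'EZ', 'FA', 'FB', 'FC', 'FD', 'FE', 'FF', 'FG']: attribute_error.append(key)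
--         if key in ['AA','BC','BF','BK','BN','CB','CF','CG','CH','CJ','CK','CM','CN','CP','CQ'] and int(responses[key]) not in range(0,4): range_error.append(key)
--         elif key in ['BA','BG','BH','BJ','BM','CA','CC','CD','CE'] and int(responses[key]) not in range(1, 6): range_error.append(key)
--         elif key in ['DA', 'DB', 'DC', 'DD', 'DE', 'DF', 'DG', 'DH'] and int(responses[key]) > 5000: range_error.append(key)
--         elif key in ['EA', 'EB', 'EC', 'ED', 'EE', 'EF', 'EG', 'EH', 'EJ', 'EK', 'EM', 'EN', 'EP', 'EQ', 'ER', 'ES', 'ET', 'EU', 'EV', 'EW', 'EX', 'EY', 'EZ', 'FA', 'FB', 'FC', 'FD', 'FE', 'FF', 'FG'] and int(responses[key]) > 5000: range_error.append(key)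
--         elif key in ['BD'] and int(responses[key]) > 9: range_error.append(key)
--         elif key in ['BE'] and int(responses[key]) > 99: range_error.append(key)
--         elif key in ['BB'] and int(responses[key]) > 999: range_error.append(key)
--         elif key in ['BP'] and int(responses[key]) > 3500: range_error.append(key)
--     return {'range': range_error, 'attribute': attribute_error }
-- ===== SOURCE B (Python) =====
-- # One rules table (key -> (low, high) bound, low=None meaning no lower bound),
-- # built once; a single pass over the keys does both checks by table lookup.
--
-- _RULES = {}
-- for _k in ('AA', 'BC', 'BF', 'BK', 'BN', 'CB', 'CF', 'CG', 'CH', 'CJ', 'CK',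
--            'CM', 'CN', 'CP', 'CQ'):
--     _RULES[_k] = (0, 3)
-- for _k in ('BA', 'BG', 'BH', 'BJ', 'BM', 'CA', 'CC', 'CD', 'CE'):
--     _RULES[_k] = (1, 5)
-- for _k in ('DA', 'DB', 'DC', 'DD', 'DE', 'DF', 'DG', 'DH',
--            'EA', 'EB', 'EC', 'ED', 'EE', 'EF', 'EG', 'EH', 'EJ', 'EK', 'EM',
--            'EN', 'EP', 'EQ', 'ER', 'ES', 'ET', 'EU', 'EV', 'EW', 'EX', 'EY',
--            'EZ', 'FA', 'FB', 'FC', 'FD', 'FE', 'FF', 'FG'):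
--     _RULES[_k] = (None, 5000)
-- _RULES['BD'] = (None, 9)
-- _RULES['BE'] = (None, 99)
-- _RULES['BB'] = (None, 999)
-- _RULES['BP'] = (None, 3500)
--
--
-- def _violates(rule, value):
--     lo, hi = rule
--     if lo is not None and value < lo:
--         return True
--     return value > hi
--
--
-- def _edayc_validate(responses):
--     range_error = []
--     attribute_error = []
--     for key in responses.keys():
--         rule = _RULES.get(key)
--         if rule is None:
--             attribute_error.append(key)
--         elif _violates(rule, int(responses[key])):
--             range_error.append(key)
--     return {'range': range_error, 'attribute': attribute_error}
-- ===== Notes on version B (the rewrite author's own statement) =====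
-- stated objective: simpler
-- what changed: Replaced the 9-branch elif cascade over hard-coded key lists with a single rules dict mapping each valid key to a uniform (low, high) bound, so one loop does both checks by a single table lookup per key; Pre_ excludes only inputs where a valid key's value is not int()-parseable, on which A (and B) raise ValueError.
import Mathlib
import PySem

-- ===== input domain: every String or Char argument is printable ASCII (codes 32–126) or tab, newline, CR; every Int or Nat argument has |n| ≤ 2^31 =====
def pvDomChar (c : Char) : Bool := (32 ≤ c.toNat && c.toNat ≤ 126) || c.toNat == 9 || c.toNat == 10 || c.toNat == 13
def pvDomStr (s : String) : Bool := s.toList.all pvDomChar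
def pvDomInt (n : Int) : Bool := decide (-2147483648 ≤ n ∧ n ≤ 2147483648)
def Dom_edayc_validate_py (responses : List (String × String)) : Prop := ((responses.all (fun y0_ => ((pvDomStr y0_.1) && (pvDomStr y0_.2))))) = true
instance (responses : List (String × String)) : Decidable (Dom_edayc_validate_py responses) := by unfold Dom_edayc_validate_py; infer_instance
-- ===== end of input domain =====

-- B replaces A's 9-branch elif cascade with one rules table mapping each valid key
-- to a uniform (low, high) bound, checked by a single lookup per key (objective: simpler).

-- ===== PORT A =====
def pvValid : List String := ["AA", "BA", "BB", "BC", "BD", "BE", "BF", "BG", "BH", "BJ", "BK", "BM", "BN", "BP", "CA", "CB", "CC", "CD", "CE", "CF", "CG", "CH", "CJ", "CK", "CM", "CN", "CP", "CQ", "DA", "DB", "DC", "DD", "DE", "DF", "DG", "DH", "EA", "EB", "EC", "ED", "EE", "EF", "EG", "EH", "EJ", "EK", "EM", "EN", "EP", "EQ", "ER", "ES", "ET", "EU", "EV", "EW", "EX", "EY", "EZ", "FA", "FB", "FC", "FD", "FE", "FF", "FG"]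
def pvG1 : List String := ["AA", "BC", "BF", "BK", "BN", "CB", "CF", "CG", "CH", "CJ", "CK", "CM", "CN", "CP", "CQ"]
def pvG2 : List String := ["BA", "BG", "BH", "BJ", "BM", "CA", "CC", "CD", "CE"]
def pvGD : List String := ["DA", "DB", "DC", "DD", "DE", "DF", "DG", "DH"]
def pvGE : List String := ["EA", "EB", "EC", "ED", "EE", "EF", "EG", "EH", "EJ", "EK", "EM", "EN", "EP", "EQ", "ER", "ES", "ET", "EU", "EV", "EW", "EX", "EY", "EZ", "FA", "FB", "FC", "FD", "FE", "FF", "FG"]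

-- step of A's loop body (one `key`); `int(responses[key])` is PySem.Int.ofStr? with a
-- default 0 that is never reached inside Pre_ (Python raises ValueError there)
def pvStepA (d : PySem.Dict String String) (st : List String × List String) (key : String) :
    List String × List String :=
  let ae := if key ∈ pvValid then st.2 else st.2 ++ [key]
  let v : Int := (PySem.Int.ofStr? (d.getD key "")).getD 0
  let re :=
    if key ∈ pvG1 ∧ v ∉ PySem.List.pyRange 0 4 1 then st.1 ++ [key]
    else if key ∈ pvG2 ∧ v ∉ PySem.List.pyRange 1 6 1 then st.1 ++ [key]
    else if key ∈ pvGD ∧ v > 5000 then st.1 ++ [key]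
    else if key ∈ pvGE ∧ v > 5000 then st.1 ++ [key]
    else if key ∈ ["BD"] ∧ v > 9 then st.1 ++ [key]
    else if key ∈ ["BE"] ∧ v > 99 then st.1 ++ [key]
    else if key ∈ ["BB"] ∧ v > 999 then st.1 ++ [key]
    else if key ∈ ["BP"] ∧ v > 3500 then st.1 ++ [key]
    else st.1
  (re, ae)

def edayc_validate_py (responses : List (String × String)) : List (String × List String) :=
  let d := PySem.Dict.mk responses
  let st := d.keys.foldl (pvStepA d) ([], [])
  [("range", st.1), ("attribute", st.2)]

-- ===== PORT B =====
-- the module-level _RULES table of Source B, in its build (insertion) order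
def pvRULES : PySem.Dict String (Option Int × Int) := PySem.Dict.mk
  [("AA", (some 0, 3)),
   ("BC", (some 0, 3)),
   ("BF", (some 0, 3)),
   ("BK", (some 0, 3)),
   ("BN", (some 0, 3)),
   ("CB", (some 0, 3)),
   ("CF", (some 0, 3)),
   ("CG", (some 0, 3)),
   ("CH", (some 0, 3)),
   ("CJ", (some 0, 3)),
   ("CK", (some 0, 3)),
   ("CM", (some 0, 3)),
   ("CN", (some 0, 3)),
   ("CP", (some 0, 3)),
   ("CQ", (some 0, 3)),
   ("BA", (some 1, 5)),
   ("BG", (some 1, 5)),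
   ("BH", (some 1, 5)),
   ("BJ", (some 1, 5)),
   ("BM", (some 1, 5)),
   ("CA", (some 1, 5)),
   ("CC", (some 1, 5)),
   ("CD", (some 1, 5)),
   ("CE", (some 1, 5)),
   ("DA", (none, 5000)),
   ("DB", (none, 5000)),
   ("DC", (none, 5000)),
   ("DD", (none, 5000)),
   ("DE", (none, 5000)),
   ("DF", (none, 5000)),
   ("DG", (none, 5000)),
   ("DH", (none, 5000)),
   ("EA", (none, 5000)),
   ("EB", (none, 5000)),
   ("EC", (none, 5000)),
   ("ED", (none, 5000)),
   ("EE", (none, 5000)),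
   ("EF", (none, 5000)),
   ("EG", (none, 5000)),
   ("EH", (none, 5000)),
   ("EJ", (none, 5000)),
   ("EK", (none, 5000)),
   ("EM", (none, 5000)),
   ("EN", (none, 5000)),
   ("EP", (none, 5000)),
   ("EQ", (none, 5000)),
   ("ER", (none, 5000)),
   ("ES", (none, 5000)),
   ("ET", (none, 5000)),
   ("EU", (none, 5000)),
   ("EV", (none, 5000)),
   ("EW", (none, 5000)),
   ("EX", (none, 5000)),
   ("EY", (none, 5000)),
   ("EZ", (none, 5000)),
   ("FA", (none, 5000)),
   ("FB", (none, 5000)),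
   ("FC", (none, 5000)),
   ("FD", (none, 5000)),
   ("FE", (none, 5000)),
   ("FF", (none, 5000)),
   ("FG", (none, 5000)),
   ("BD", (none, 9)),
   ("BE", (none, 99)),
   ("BB", (none, 999)),
   ("BP", (none, 3500))]

def pvViolates (rule : Option Int × Int) (value : Int) : Bool :=
  match rule with
  | (lo, hi) =>
    match lo with
    | some l => if value < l then true else decide (value > hi)
    | none => decide (value > hi)

def pvStepB (d : PySem.Dict String String) (st : List String × List String) (key : String) :
    List String × List String :=
  match PySem.Dict.get? pvRULES key with
  | none => (st.1, st.2 ++ [key])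
  | some rule =>
    if pvViolates rule ((PySem.Int.ofStr? (d.getD key "")).getD 0)
    then (st.1 ++ [key], st.2) else st

def edayc_validate_py_alt (responses : List (String × String)) : List (String × List String) :=
  let d := PySem.Dict.mk responses
  let st := d.keys.foldl (pvStepB d) ([], [])
  [("range", st.1), ("attribute", st.2)]

-- ===== PRECONDITION & SPEC =====
-- Python A raises ValueError when a valid attribute key carries a value int() cannot parse;
-- Pre_ excludes exactly those inputs (B raises there as well).
def Pre_edayc_validate_py (responses : List (String × String)) : Prop :=
  ∀ p ∈ responses, p.1 ∈ pvValid →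
    (PySem.Int.ofStr? ((PySem.Dict.mk responses).getD p.1 "")).isSome
instance (responses : List (String × String)) : Decidable (Pre_edayc_validate_py responses) := by
  unfold Pre_edayc_validate_py; infer_instance
def pvWitness_edayc_validate_py : (List (String × String)) := [("AA", "3"), ("ZZ", "x"), ("BP", " 3501 ")]

def Spec_edayc_validate_py (responses : List (String × String)) (out : List (String × List String)) : Prop := out = edayc_validate_py_alt responses
instance (responses : List (String × String)) (out : List (String × List String)) : Decidable (Spec_edayc_validate_py responses out) := by unfold Spec_edayc_validate_py; infer_instance

-- ===== CLAIM (what is proved, stated in full; the proofs are below) =====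
def Claim_equal_edayc_validate_py : Prop := ∀ (responses : List (String × String)), Dom_edayc_validate_py responses → Pre_edayc_validate_py responses → Spec_edayc_validate_py responses (edayc_validate_py responses)

-- ===== LEMMAS AND PROOFS =====

-- rule-table facts, evaluated once by `decide`
theorem pv_keys_sub : ∀ k ∈ (PySem.Dict.keys pvRULES), k ∈ pvValid := by decide
theorem pv_sub : (∀ k ∈ pvG1, k ∈ pvValid) ∧ (∀ k ∈ pvG2, k ∈ pvValid) ∧
    (∀ k ∈ pvGD, k ∈ pvValid) ∧ (∀ k ∈ pvGE, k ∈ pvValid) := by decide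
theorem pv_f1 : ∀ k ∈ pvG1, PySem.Dict.get? pvRULES k = some (some 0, 3) ∧
    k ∉ pvG2 ∧ k ∉ pvGD ∧ k ∉ pvGE ∧ k ≠ "BD" ∧ k ≠ "BE" ∧ k ≠ "BB" ∧ k ≠ "BP" := by decide
theorem pv_f2 : ∀ k ∈ pvG2, PySem.Dict.get? pvRULES k = some (some 1, 5) ∧
    k ∉ pvG1 ∧ k ∉ pvGD ∧ k ∉ pvGE ∧ k ≠ "BD" ∧ k ≠ "BE" ∧ k ≠ "BB" ∧ k ≠ "BP" := by decide
theorem pv_f3 : ∀ k ∈ pvGD, PySem.Dict.get? pvRULES k = some (none, 5000) ∧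
    k ∉ pvG1 ∧ k ∉ pvG2 ∧ k ∉ pvGE ∧ k ≠ "BD" ∧ k ≠ "BE" ∧ k ≠ "BB" ∧ k ≠ "BP" := by decide
theorem pv_f4 : ∀ k ∈ pvGE, PySem.Dict.get? pvRULES k = some (none, 5000) ∧
    k ∉ pvG1 ∧ k ∉ pvG2 ∧ k ∉ pvGD ∧ k ≠ "BD" ∧ k ≠ "BE" ∧ k ≠ "BB" ∧ k ≠ "BP" := by decide
theorem pv_cover : ∀ k ∈ pvValid, k ∈ pvG1 ∨ k ∈ pvG2 ∨ k ∈ pvGD ∨ k ∈ pvGE ∨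
    k = "BD" ∨ k = "BE" ∨ k = "BB" ∨ k = "BP" := by decide
theorem pv_bd : PySem.Dict.get? pvRULES "BD" = some (none, 9) ∧ ("BD" : String) ∉ pvG1 ∧ ("BD" : String) ∉ pvG2 ∧ ("BD" : String) ∉ pvGD ∧ ("BD" : String) ∉ pvGE := by decide
theorem pv_be : PySem.Dict.get? pvRULES "BE" = some (none, 99) ∧ ("BE" : String) ∉ pvG1 ∧ ("BE" : String) ∉ pvG2 ∧ ("BE" : String) ∉ pvGD ∧ ("BE" : String) ∉ pvGE := by decide
theorem pv_bb : PySem.Dict.get? pvRULES "BB" = some (none, 999) ∧ ("BB" : String) ∉ pvG1 ∧ ("BB" : String) ∉ pvG2 ∧ ("BB" : String) ∉ pvGD ∧ ("BB" : String) ∉ pvGE := by decide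
theorem pv_bp : PySem.Dict.get? pvRULES "BP" = some (none, 3500) ∧ ("BP" : String) ∉ pvG1 ∧ ("BP" : String) ∉ pvG2 ∧ ("BP" : String) ∉ pvGD ∧ ("BP" : String) ∉ pvGE := by decide

theorem pv_step_eq (d : PySem.Dict String String) (st : List String × List String)
    (key : String) : pvStepA d st key = pvStepB d st key := by
  obtain ⟨re, ae⟩ := st
  by_cases hv : key ∈ pvValid
  · rcases pv_cover key hv with h | h | h | h | h | h | h | h
    · obtain ⟨hg, h2, h3, h4, h5, h6, h7, h8⟩ := pv_f1 key h
      simp [pvStepA, pvStepB, hv, h, h2, h3, h4, h5, h6, h7, h8, hg, pvViolates,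
            PySem.List.mem_pyRange_one]
      split_ifs <;> first | rfl | omega
    · obtain ⟨hg, h2, h3, h4, h5, h6, h7, h8⟩ := pv_f2 key h
      simp [pvStepA, pvStepB, hv, h, h2, h3, h4, h5, h6, h7, h8, hg, pvViolates,
            PySem.List.mem_pyRange_one]
      split_ifs <;> first | rfl | omega
    · obtain ⟨hg, h2, h3, h4, h5, h6, h7, h8⟩ := pv_f3 key h
      simp [pvStepA, pvStepB, hv, h, h2, h3, h4, h5, h6, h7, h8, hg, pvViolates,
            PySem.List.mem_pyRange_one]
      split_ifs <;> rfl
    · obtain ⟨hg, h2, h3, h4, h5, h6, h7, h8⟩ := pv_f4 key h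
      simp [pvStepA, pvStepB, hv, h, h2, h3, h4, h5, h6, h7, h8, hg, pvViolates,
            PySem.List.mem_pyRange_one]
      split_ifs <;> rfl
    · subst h
      obtain ⟨hg, h2, h3, h4, h5⟩ := pv_bd
      simp [pvStepA, pvStepB, hv, h2, h3, h4, h5, hg, pvViolates]
      split_ifs <;> rfl
    · subst h
      obtain ⟨hg, h2, h3, h4, h5⟩ := pv_be
      simp [pvStepA, pvStepB, hv, h2, h3, h4, h5, hg, pvViolates]
      split_ifs <;> rfl
    · subst h
      obtain ⟨hg, h2, h3, h4, h5⟩ := pv_bb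
      simp [pvStepA, pvStepB, hv, h2, h3, h4, h5, hg, pvViolates]
      split_ifs <;> rfl
    · subst h
      obtain ⟨hg, h2, h3, h4, h5⟩ := pv_bp
      simp [pvStepA, pvStepB, hv, h2, h3, h4, h5, hg, pvViolates]
      split_ifs <;> rfl
  · have hg : PySem.Dict.get? pvRULES key = none :=
      Iff.mpr (PySem.Dict.get?_eq_none_iff_not_mem_keys pvRULES key) (fun hm => hv (pv_keys_sub key hm))
    have h1 : key ∉ pvG1 := fun hm => hv (pv_sub.1 key hm)
    have h2 : key ∉ pvG2 := fun hm => hv (pv_sub.2.1 key hm)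
    have h3 : key ∉ pvGD := fun hm => hv (pv_sub.2.2.1 key hm)
    have h4 : key ∉ pvGE := fun hm => hv (pv_sub.2.2.2 key hm)
    have hbd : key ≠ "BD" := fun e => hv (e ▸ (by decide : ("BD" : String) ∈ pvValid))
    have hbe : key ≠ "BE" := fun e => hv (e ▸ (by decide : ("BE" : String) ∈ pvValid))
    have hbb : key ≠ "BB" := fun e => hv (e ▸ (by decide : ("BB" : String) ∈ pvValid))
    have hbp : key ≠ "BP" := fun e => hv (e ▸ (by decide : ("BP" : String) ∈ pvValid))
    simp [pvStepA, pvStepB, hg, hv, h1, h2, h3, h4, hbd, hbe, hbb, hbp]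

-- ===== VERDICT (by name: the statement is the Claim_ definition above) =====
theorem edayc_validate_py_spec : Claim_equal_edayc_validate_py := by
  intro responses _ _
  unfold Spec_edayc_validate_py edayc_validate_py edayc_validate_py_alt
  have h : pvStepA (PySem.Dict.mk responses) = pvStepB (PySem.Dict.mk responses) :=
    funext fun st => funext fun key => pv_step_eq _ st key
  simp only [h]
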